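-- pv_equiv track=rewrite | github.com/Upendra-Sahu-ML/observability-agent | common/tools/azure_monitor_tools.py | _generate_error_recommendations
-- ===== SOURCE A (Python) =====
-- from typing import Dict, List, Any, Optional
--
-- def _generate_error_recommendations(errors: List) -> List[str]:
--     """Generate recommendations based on error patterns"""
--     recommendations = []
--
--     for error in errors[:5]:  # Top 5 errors
--         error_type = error[0].lower()
--         count = error[1]
--
--         if count > 10:
--             if "sql" in error_type or "database" in error_type:
--                 recommendations.append("Check PostgreSQL connection pool settings and database performance")
--             elif "memory" in error_type:
--                 recommendations.append("Review JVM heap settings and check for memory leaks")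
--             elif "timeout" in error_type:
--                 recommendations.append("Investigate network latency and service dependencies")
--             else:
--                 recommendations.append(f"Investigate high frequency {error_type} errors ({count} occurrences)")
--
--     if not recommendations:
--         recommendations.append("Monitor application for recurring error patterns")
--
--     return recommendations
-- ===== SOURCE B (Python) =====
-- _KEYWORD_PRIORITY = {"sql": 0, "database": 0, "memory": 1, "timeout": 2}
--
-- _MESSAGES = [
--     "Check PostgreSQL connection pool settings and database performance",
--     "Review JVM heap settings and check for memory leaks",
--     "Investigate network latency and service dependencies",
-- ]
--
--
-- def _generate_error_recommendations(errors):
--     """Generate recommendations based on error patterns"""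
--
--     def rec(rest):
--         if not rest:
--             return []
--         tail = rec(rest[1:])
--         name, count = rest[0][0], rest[0][1]
--         if count <= 10:
--             return tail
--         error_type = name.lower()
--         hits = [p for k, p in _KEYWORD_PRIORITY.items() if k in error_type]
--         if hits:
--             return [_MESSAGES[min(hits)]] + tail
--         return [f"Investigate high frequency {error_type} errors ({count} occurrences)"] + tail
--
--     out = rec(errors[:5])
--     return out if out else ["Monitor application for recurring error patterns"]
-- ===== Notes on version B (the rewrite author's own statement) =====
-- stated objective: alternative
-- what changed: Replaces A's accumulator loop with an ordered if/elif first-match chain by a structural recursion over errors[:5] that collects ALL matched keyword priorities from a keyword->priority dict and indexes a message table at their minimum, with the f-string/empty fallbacks.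
import Mathlib
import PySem

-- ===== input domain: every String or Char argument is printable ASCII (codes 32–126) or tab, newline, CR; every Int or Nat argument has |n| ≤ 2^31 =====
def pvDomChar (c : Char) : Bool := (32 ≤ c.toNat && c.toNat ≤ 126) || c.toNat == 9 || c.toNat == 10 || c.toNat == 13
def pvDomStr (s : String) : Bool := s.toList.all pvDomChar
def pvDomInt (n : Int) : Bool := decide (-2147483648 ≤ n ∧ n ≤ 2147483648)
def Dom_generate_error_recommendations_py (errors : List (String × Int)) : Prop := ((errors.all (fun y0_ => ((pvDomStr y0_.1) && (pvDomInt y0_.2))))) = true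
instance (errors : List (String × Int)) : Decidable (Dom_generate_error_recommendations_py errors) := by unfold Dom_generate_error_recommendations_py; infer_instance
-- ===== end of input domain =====

-- B replaces A's accumulator loop and ordered if/elif first-match chain by structural recursion that
-- gathers ALL matched keyword priorities and indexes the message table at their minimum (objective: alternative).

-- ===== PORT A =====
-- literal transliteration of A: loop over errors[:5] appending to an accumulator, then the empty fallback
def generate_error_recommendations_py (errors : List (String × Int)) : List String :=
  let recommendations : List String :=
    (PySem.List.slice errors none (some 5)).foldl
      (fun recommendations error =>
        let error_type := PySem.Str.lower error.1
        let count := error.2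
        if count > 10 then
          if PySem.Str.isIn "sql" error_type || PySem.Str.isIn "database" error_type then
            recommendations ++ ["Check PostgreSQL connection pool settings and database performance"]
          else if PySem.Str.isIn "memory" error_type then
            recommendations ++ ["Review JVM heap settings and check for memory leaks"]
          else if PySem.Str.isIn "timeout" error_type then
            recommendations ++ ["Investigate network latency and service dependencies"]
          else
            recommendations ++ ["Investigate high frequency " ++ error_type ++ " errors (" ++ PySem.Int.toStr count ++ " occurrences)"]
        else recommendations) []
  if recommendations = [] then
    recommendations ++ ["Monitor application for recurring error patterns"]
  else recommendations

-- ===== PORT B =====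
def pvKeywordPriority : List (String × Nat) :=
  [("sql", 0), ("database", 0), ("memory", 1), ("timeout", 2)]

def pvMessages : List String :=
  [ "Check PostgreSQL connection pool settings and database performance",
    "Review JVM heap settings and check for memory leaks",
    "Investigate network latency and service dependencies" ]

-- the inner recursive helper `rec` of Source B: structural recursion, prepending results
def pvRec : List (String × Int) → List String
  | [] => []
  | e :: rest =>
    let tail := pvRec rest
    let name := e.1
    let count := e.2
    if count ≤ 10 then tail
    else
      let error_type := PySem.Str.lower name
      let hits := pvKeywordPriority.filterMap
        (fun kp => if PySem.Str.isIn kp.1 error_type then some kp.2 else none)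
      if hits ≠ [] then
        -- _MESSAGES[min(hits)]: the index is one of the stored priorities 0/1/2, always in range
        ((PySem.List.pyGet? pvMessages (Int.ofNat (hits.min?.getD 0))).getD "") :: tail
      else
        ("Investigate high frequency " ++ error_type ++ " errors (" ++ PySem.Int.toStr count ++ " occurrences)") :: tail

def generate_error_recommendations_py_alt (errors : List (String × Int)) : List String :=
  let out := pvRec (PySem.List.slice errors none (some 5))
  if out ≠ [] then out else ["Monitor application for recurring error patterns"]

-- ===== PRECONDITION & SPEC =====
def Spec_generate_error_recommendations_py (errors : List (String × Int)) (out : List String) : Prop := out = generate_error_recommendations_py_alt errors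
instance (errors : List (String × Int)) (out : List String) : Decidable (Spec_generate_error_recommendations_py errors out) := by unfold Spec_generate_error_recommendations_py; infer_instance

-- ===== CLAIM (what is proved, stated in full; the proofs are below) =====
def Claim_equal_generate_error_recommendations_py : Prop := ∀ (errors : List (String × Int)), Dom_generate_error_recommendations_py errors → Spec_generate_error_recommendations_py errors (generate_error_recommendations_py errors)

-- ===== LEMMAS AND PROOFS =====

-- per-element: B's min-over-matched-priorities lookup picks exactly the branch of A's if/elif chain
lemma pvHead_eq (e : String × Int) (tail : List String) (h : e.2 > 10) :
    pvRec [e] ++ tail =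
      (let error_type := PySem.Str.lower e.1
       if PySem.Str.isIn "sql" error_type || PySem.Str.isIn "database" error_type then
         "Check PostgreSQL connection pool settings and database performance"
       else if PySem.Str.isIn "memory" error_type then
         "Review JVM heap settings and check for memory leaks"
       else if PySem.Str.isIn "timeout" error_type then
         "Investigate network latency and service dependencies"
       else
         "Investigate high frequency " ++ error_type ++ " errors (" ++ PySem.Int.toStr e.2 ++ " occurrences)") :: tail := by
  have h10 : ¬ e.2 ≤ 10 := by omega
  by_cases hs : PySem.Str.isIn "sql" (PySem.Str.lower e.1) <;>
    by_cases hd : PySem.Str.isIn "database" (PySem.Str.lower e.1) <;>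
      by_cases hm : PySem.Str.isIn "memory" (PySem.Str.lower e.1) <;>
        by_cases ht : PySem.Str.isIn "timeout" (PySem.Str.lower e.1) <;>
          simp_all [pvRec, pvKeywordPriority, pvMessages, List.filterMap, List.min?,
                PySem.Str.isIn, PySem.List.pyGet?, PySem.List.pyIdx?] <;>
          rw [if_neg (by omega)] <;> simp

-- pvRec distributes over cons: the head's contribution depends only on the head
lemma pvRec_cons (e : String × Int) (rest : List (String × Int)) :
    pvRec (e :: rest) = pvRec [e] ++ pvRec rest := by
  simp only [pvRec]
  split_ifs <;> simp

-- A's accumulator loop equals B's recursion (prepending), shifted by the accumulator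
lemma pvLoop_eq (l : List (String × Int)) (acc : List String) :
    l.foldl
      (fun recommendations error =>
        let error_type := PySem.Str.lower error.1
        let count := error.2
        if count > 10 then
          if PySem.Str.isIn "sql" error_type || PySem.Str.isIn "database" error_type then
            recommendations ++ ["Check PostgreSQL connection pool settings and database performance"]
          else if PySem.Str.isIn "memory" error_type then
            recommendations ++ ["Review JVM heap settings and check for memory leaks"]
          else if PySem.Str.isIn "timeout" error_type then
            recommendations ++ ["Investigate network latency and service dependencies"]
          else
            recommendations ++ ["Investigate high frequency " ++ error_type ++ " errors (" ++ PySem.Int.toStr count ++ " occurrences)"]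
        else recommendations) acc
    = acc ++ pvRec l := by
  induction l generalizing acc with
  | nil => simp [pvRec]
  | cons e rest ih =>
    simp only [List.foldl_cons]
    by_cases h : e.2 > 10
    · rw [if_pos h, ih, pvRec_cons, pvHead_eq e (pvRec rest) h]
      split_ifs <;> simp_all [PySem.Str.isIn]
    · have : pvRec (e :: rest) = pvRec rest := by
        simp only [pvRec]; rw [if_pos (by omega)]
      rw [if_neg h, ih, this]

-- ===== VERDICT (by name: the statement is the Claim_ definition above) =====
theorem generate_error_recommendations_py_spec : Claim_equal_generate_error_recommendations_py := by
  intro errors _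
  unfold Spec_generate_error_recommendations_py generate_error_recommendations_py generate_error_recommendations_py_alt
  rw [pvLoop_eq]
  simp only [List.nil_append]
  split_ifs with h1 h2 <;> simp_all
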